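-- pv_equiv track=rewrite | github.com/sonald/aish | src/aish/wizard/helpers.py | _matches_filter_query
-- ===== SOURCE A (Python) =====
-- def _normalize_filter_tokens(query: str) -> list[str]:
--     normalized = []
--     for chunk in query.lower().split():
--         token = "".join(
--             char for char in chunk if char.isalnum() or char in {"/", "_", "-", "."}
--         )
--         if token:
--             normalized.append(token)
--     return normalized
--
-- def _sanitize_filter_input(value: str) -> str:
--     return "".join(
--         char
--         for char in value
--         if char.isprintable() and char not in {"\r", "\n", "\u2028", "\u2029"}
--     )
--
-- def _matches_filter_query(query: str, candidates: list[str]) -> bool: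
--     tokens = _normalize_filter_tokens(_sanitize_filter_input(query))
--     if not tokens:
--         return True
--
--     haystack = " ".join(str(item).lower() for item in candidates if str(item).strip())
--     if not haystack:
--         return False
--     return all(token in haystack for token in tokens)
-- ===== SOURCE B (Python) =====
-- def _matches_filter_query(query: str, candidates: list[str]) -> bool:
--     # B: no joined haystack and no helper functions -- tokens via comprehensions,
--     # then per-token search over the candidates with a for/else loop (break on hit).
--     sanitized = "".join(
--         c for c in query if c.isprintable() and c not in "\r\n\u2028\u2029"
--     )
--     tokens = [
--         t
--         for t in (
--             "".join(c for c in chunk if c.isalnum() or c in "/_-.")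
--             for chunk in sanitized.lower().split()
--         )
--         if t
--     ]
--     for token in tokens:
--         for item in candidates:
--             s = str(item)
--             if s.strip() and token in s.lower():
--                 break
--         else:
--             return False
--     return True
-- ===== Notes on version B (the rewrite author's own statement) =====
-- stated objective: alternative
-- what changed: B removes A's helper-function pipeline and its space-joined haystack: tokens are built with a map/filter comprehension and each token is searched per candidate in a nested for/else loop with break, with no early return for empty tokens (the outer loop handles it); equivalent because normalized tokens never contain whitespace, so a token cannot match across A's join boundary, and the empty-haystack guard coincides with no candidate ever matching a nonempty token.
import Mathlib
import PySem

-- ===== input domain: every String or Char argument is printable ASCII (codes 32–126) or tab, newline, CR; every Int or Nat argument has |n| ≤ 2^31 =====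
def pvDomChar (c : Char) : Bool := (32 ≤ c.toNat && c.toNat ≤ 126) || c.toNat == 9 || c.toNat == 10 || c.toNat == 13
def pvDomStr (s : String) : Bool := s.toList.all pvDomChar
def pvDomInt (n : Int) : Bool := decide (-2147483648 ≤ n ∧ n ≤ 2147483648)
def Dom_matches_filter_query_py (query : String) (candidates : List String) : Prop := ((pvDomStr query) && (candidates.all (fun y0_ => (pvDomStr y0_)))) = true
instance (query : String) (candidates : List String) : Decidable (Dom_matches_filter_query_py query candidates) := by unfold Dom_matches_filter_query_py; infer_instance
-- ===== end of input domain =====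

-- B drops A's space-joined haystack and A's helper-function pipeline: tokens come from a
-- map/filter comprehension and each token is searched per candidate with a break/else loop
-- (alternative decomposition, same cost); tokens contain no whitespace, so this is equivalent.

-- ===== PORT A =====
-- char.isprintable(): exact on the stated domain (ASCII 32–126 plus tab/LF/CR; of those,
-- exactly codes 32–126 are printable in Python)
def pyIsPrintable (c : Char) : Bool := 32 ≤ c.toNat && c.toNat ≤ 126

-- _sanitize_filter_input
def sanitizeFilterInput (cs : List Char) : List Char :=
  cs.filter (fun c =>
    pyIsPrintable c && !(c == '\r' || c == '\n' || c == '\u2028' || c == '\u2029'))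

def keepTokenChar (c : Char) : Bool :=
  PySem.Chars.isalnum c || (c == '/' || c == '_' || c == '-' || c == '.')

-- _normalize_filter_tokens (explicit loop with append, as in A)
def normalizeFilterTokens (cs : List Char) : List (List Char) :=
  (PySem.Chars.split₀ (PySem.Chars.lower cs)).foldl
    (fun acc chunk =>
      let token := chunk.filter keepTokenChar
      if token ≠ [] then acc ++ [token] else acc) []

def matches_filter_query_py (query : String) (candidates : List String) : Bool :=
  let tokens := normalizeFilterTokens (sanitizeFilterInput query.toList)
  if tokens = [] then true
  else
    let haystack := PySem.Chars.join [' ']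
      (((candidates.map String.toList).filter
          (fun item => PySem.Chars.strip item ≠ [])).map PySem.Chars.lower)
    if haystack = [] then false
    else tokens.all (fun token => PySem.Chars.isIn token haystack)

-- ===== PORT B =====
-- inner 'for item in candidates: … break / else: return False' loop: does some candidate hit?
def pvTokenHit (token : List Char) : List String → Bool
  | [] => false
  | item :: rest =>
      let s := item.toList
      if PySem.Chars.strip s ≠ [] ∧ PySem.Chars.isIn token (PySem.Chars.lower s) then true
      else pvTokenHit token rest

-- outer 'for token in tokens' loop, returning False as soon as a token has no hit
def pvCheckTokens (candidates : List String) : List (List Char) → Bool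
  | [] => true
  | t :: rest => if pvTokenHit t candidates then pvCheckTokens candidates rest else false

def matches_filter_query_py_alt (query : String) (candidates : List String) : Bool :=
  let sanitized := query.toList.filter (fun c =>
    pyIsPrintable c && !(c == '\r' || c == '\n' || c == '\u2028' || c == '\u2029'))
  let tokens :=
    ((PySem.Chars.split₀ (PySem.Chars.lower sanitized)).map
        (fun chunk => chunk.filter keepTokenChar)).filter (fun t => t ≠ [])
  pvCheckTokens candidates tokens

-- ===== PRECONDITION & SPEC =====
def Spec_matches_filter_query_py (query : String) (candidates : List String) (out : Bool) : Prop := out = matches_filter_query_py_alt query candidates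
instance (query : String) (candidates : List String) (out : Bool) : Decidable (Spec_matches_filter_query_py query candidates out) := by unfold Spec_matches_filter_query_py; infer_instance

-- ===== CLAIM (what is proved, stated in full; the proofs are below) =====
def Claim_equal_matches_filter_query_py : Prop := ∀ (query : String) (candidates : List String), Dom_matches_filter_query_py query candidates → Spec_matches_filter_query_py query candidates (matches_filter_query_py query candidates)

-- ===== LEMMAS AND PROOFS =====

-- A's append-if foldl produces exactly B's map-then-filter token list
theorem foldl_tokens_eq (l : List (List Char)) : ∀ (acc : List (List Char)),
    l.foldl (fun acc chunk =>
      let token := chunk.filter keepTokenChar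
      if token ≠ [] then acc ++ [token] else acc) acc
    = acc ++ (l.map (fun chunk => chunk.filter keepTokenChar)).filter (fun t => t ≠ []) := by
  induction l with
  | nil => intro acc; simp
  | cons chunk rest ih =>
    intro acc
    simp only [List.foldl_cons, List.map_cons, List.filter_cons]
    by_cases h : chunk.filter keepTokenChar ≠ []
    · rw [if_pos h, ih, List.append_assoc]
      simp [h]
    · rw [if_neg h, ih]
      simp [h]

-- a space-free prefix of u ++ ' ' :: v is a prefix of u
theorem prefix_no_space (t : List Char) : ∀ (u v : List Char), ' ' ∉ t →
    t <+: u ++ ' ' :: v → t <+: u := by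
  induction t with
  | nil => intro u v _ _; exact List.nil_prefix
  | cons c t' ih =>
    intro u v hs h
    cases u with
    | nil =>
      simp only [List.nil_append, List.cons_prefix_cons] at h
      exact absurd (h.1 ▸ List.mem_cons_self) hs
    | cons a u' =>
      simp only [List.cons_append, List.cons_prefix_cons] at h ⊢
      exact ⟨h.1, ih u' v (fun hm => hs (List.mem_cons_of_mem _ hm)) h.2⟩

-- a space-free infix of u ++ ' ' :: v is an infix of u or of v
theorem infix_no_space (t : List Char) (hs : ' ' ∉ t) :
    ∀ (u v : List Char), t <:+: u ++ ' ' :: v → t <:+: u ∨ t <:+: v := by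
  intro u
  induction u with
  | nil =>
    intro v h
    rcases List.infix_cons_iff.mp h with hp | hi
    · left
      have := prefix_no_space t [] v hs (by simpa using hp)
      simpa using this.isInfix
    · right; exact hi
  | cons a u' ih =>
    intro v h
    rcases List.infix_cons_iff.mp (by simpa using h) with hp | hi
    · exact Or.inl (prefix_no_space t (a :: u') v hs hp).isInfix
    · rcases ih v hi with h1 | h2
      · exact Or.inl (h1.trans (List.suffix_cons a u').isInfix)
      · exact Or.inr h2

-- membership of a space-free nonempty token in the space-joined list ↔ in some element
theorem isIn_join (t : List Char) (ht : t ≠ []) (hs : ' ' ∉ t) :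
    ∀ (xs : List (List Char)),
    PySem.Chars.isIn t (PySem.Chars.join [' '] xs) = xs.any (fun x => PySem.Chars.isIn t x) := by
  intro xs
  induction xs with
  | nil =>
    simp only [PySem.Chars.join_nil, List.any_nil]
    rw [show PySem.Chars.isIn t [] = false from by
      cases h : PySem.Chars.isIn t []
      · rfl
      · exact absurd (List.eq_nil_of_infix_nil ((PySem.Chars.isIn_iff_infix _ _).mp h)) ht]
  | cons x rest ih =>
    cases rest with
    | nil => simp [PySem.Chars.join_singleton]
    | cons y r =>
      rw [PySem.Chars.join_cons_cons]
      apply Bool.eq_iff_iff.mpr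
      constructor
      · intro h
        have hinf := (PySem.Chars.isIn_iff_infix _ _).mp h
        rw [List.append_assoc, List.singleton_append] at hinf
        rcases infix_no_space t hs x (PySem.Chars.join [' '] (y :: r)) hinf with h1 | h2
        · simp only [List.any_cons, Bool.or_eq_true]
          exact Or.inl ((PySem.Chars.isIn_iff_infix _ _).mpr h1)
        · have := (PySem.Chars.isIn_iff_infix _ _).mpr h2
          rw [ih] at this
          simp only [List.any_cons, Bool.or_eq_true]
          exact Or.inr (by simpa using this)
      · intro h
        simp only [List.any_cons, Bool.or_eq_true] at h
        apply (PySem.Chars.isIn_iff_infix _ _).mpr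
        rcases h with h1 | h2
        · have h1' := (PySem.Chars.isIn_iff_infix _ _).mp h1
          refine h1'.trans ?_
          have hp := (List.prefix_append x ([' '] ++ PySem.Chars.join [' '] (y :: r))).isInfix
          simpa [List.append_assoc] using hp
        · have : PySem.Chars.isIn t (PySem.Chars.join [' '] (y :: r)) = true := by
            rw [ih]; simpa using h2
          have hinf := (PySem.Chars.isIn_iff_infix _ _).mp this
          refine hinf.trans ?_
          have : PySem.Chars.join [' '] (y :: r) <:+ (x ++ [' ']) ++ PySem.Chars.join [' '] (y :: r) :=
            List.suffix_append _ _
          simpa [List.append_assoc] using this.isInfix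

-- B's inner candidate loop equals 'some surviving lowered candidate contains the token'
theorem tokenHit_eq_any (t : List Char) : ∀ (cands : List String),
    pvTokenHit t cands
      = (((cands.map String.toList).filter
            (fun item => PySem.Chars.strip item ≠ [])).map PySem.Chars.lower).any
          (fun x => PySem.Chars.isIn t x) := by
  intro cands
  induction cands with
  | nil => rfl
  | cons item rest ih =>
    simp only [pvTokenHit, List.map_cons, List.filter_cons]
    by_cases hc : PySem.Chars.strip item.toList ≠ [] ∧ PySem.Chars.isIn t (PySem.Chars.lower item.toList) = true
    · rw [if_pos hc]
      simp [hc.1, hc.2]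
    · rw [if_neg hc, ih]
      by_cases hstrip : PySem.Chars.strip item.toList ≠ []
      · have hin : PySem.Chars.isIn t (PySem.Chars.lower item.toList) = false := by
          cases h : PySem.Chars.isIn t (PySem.Chars.lower item.toList)
          · rfl
          · exact absurd ⟨hstrip, h⟩ hc
        simp [hstrip, hin]
      · simp only [ne_eq, not_not] at hstrip
        simp [hstrip]

-- B's outer token loop equals 'all tokens hit'
theorem checkTokens_eq_all (cands : List String) : ∀ (ts : List (List Char)),
    pvCheckTokens cands ts = ts.all (fun t => pvTokenHit t cands) := by
  intro ts
  induction ts with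
  | nil => rfl
  | cons t rest ih =>
    simp only [pvCheckTokens, List.all_cons]
    by_cases h : pvTokenHit t cands = true
    · rw [if_pos h, ih, h, Bool.true_and]
    · simp [Bool.eq_false_iff.mpr h]

-- every token in B's token list is nonempty and space-free
theorem tokens_nonempty_nospace (l : List (List Char)) (t : List Char)
    (h : t ∈ (l.map (fun chunk => chunk.filter keepTokenChar)).filter (fun t => t ≠ [])) :
    t ≠ [] ∧ ' ' ∉ t := by
  have hne : t ≠ [] := by simpa using (List.mem_filter.mp h).2
  refine ⟨hne, fun hsp => ?_⟩
  rcases List.mem_map.mp (List.mem_filter.mp h).1 with ⟨chunk, _, rfl⟩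
  exact absurd (List.mem_filter.mp hsp).2 (by decide)

theorem all_congr_mem {α : Type} (l : List α) (f g : α → Bool)
    (h : ∀ a ∈ l, f a = g a) : l.all f = l.all g := by
  induction l with
  | nil => rfl
  | cons a rest ih =>
    simp only [List.all_cons]
    rw [h a List.mem_cons_self, ih (fun b hb => h b (List.mem_cons_of_mem a hb))]

-- ===== VERDICT (by name: the statement is the Claim_ definition above) =====
theorem matches_filter_query_py_spec : Claim_equal_matches_filter_query_py := by
  unfold Claim_equal_matches_filter_query_py
  intro query candidates _
  unfold Spec_matches_filter_query_py
  show matches_filter_query_py query candidates = matches_filter_query_py_alt query candidates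
  simp only [matches_filter_query_py, matches_filter_query_py_alt]
  have hsan : sanitizeFilterInput query.toList
      = query.toList.filter (fun c =>
          pyIsPrintable c && !(c == '\r' || c == '\n' || c == '\u2028' || c == '\u2029')) := rfl
  rw [← hsan]
  set tokens :=
    ((PySem.Chars.split₀ (PySem.Chars.lower (sanitizeFilterInput query.toList))).map
        (fun chunk => chunk.filter keepTokenChar)).filter (fun t => t ≠ []) with htokB
  have htokA : normalizeFilterTokens (sanitizeFilterInput query.toList) = tokens := by
    unfold normalizeFilterTokens
    rw [foldl_tokens_eq]
    simp [htokB]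
  rw [htokA, checkTokens_eq_all]
  by_cases hT : tokens = []
  · rw [hT]; simp
  · rw [if_neg hT]
    set xs := ((candidates.map String.toList).filter
        (fun item => PySem.Chars.strip item ≠ [])).map PySem.Chars.lower with hxs
    have hxne : ∀ x ∈ xs, x ≠ [] := by
      intro x hx
      rcases List.mem_map.mp hx with ⟨y, hy, rfl⟩
      have hstrip : PySem.Chars.strip y ≠ [] := by
        simpa using (List.mem_filter.mp hy).2
      intro hlow
      have : y = [] := by simpa [PySem.Chars.lower] using hlow
      subst this
      exact hstrip rfl
    have hB : tokens.all (fun t => pvTokenHit t candidates)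
        = tokens.all (fun t => xs.any (fun x => PySem.Chars.isIn t x)) := by
      apply all_congr_mem
      intro t _
      rw [tokenHit_eq_any]
    rw [hB]
    cases hxsnil : xs with
    | nil =>
      obtain ⟨a, r, har⟩ := List.exists_cons_of_ne_nil hT
      rw [har]
      simp [PySem.Chars.join_nil]
    | cons x rest =>
      have hxnenil : x ≠ [] := hxne x (by rw [hxsnil]; exact List.mem_cons_self)
      have hjne : PySem.Chars.join [' '] (x :: rest) ≠ [] := by
        cases rest with
        | nil => rw [PySem.Chars.join_singleton]; exact hxnenil
        | cons y r =>
          rw [PySem.Chars.join_cons_cons]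
          intro hnil
          exact hxnenil (List.append_eq_nil_iff.mp
            (List.append_eq_nil_iff.mp hnil).1).1
      rw [if_neg hjne]
      apply all_congr_mem
      intro t htmem
      have hinv := tokens_nonempty_nospace _ t (htokB ▸ htmem)
      exact isIn_join t hinv.1 hinv.2 (x :: rest)
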